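-- pv_equiv track=rewrite | github.com/julsukim/algorithm_exercise | Python/2025/2501/250113/BAEK_20914.py | bfs
-- ===== SOURCE A (Python) =====
-- from collections import deque
--
-- keyboard = {
--     'Q': ['W', 'A'],
--     'W': ['Q', 'A', 'S', 'E'],
--     'E': ['W', 'S', 'D', 'R'],
--     'R': ['E', 'D', 'F', 'T'],
--     'T': ['R', 'F', 'G', 'Y'],
--     'Y': ['T', 'G', 'H', 'U'],
--     'U': ['Y', 'H', 'J', 'I'],
--     'I': ['U', 'J', 'K', 'O'],
--     'O': ['I', 'K', 'L', 'P'],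
--     'P': ['O', 'L'],
--     'A': ['Q', 'W', 'S', 'Z'],
--     'S': ['A', 'W', 'E', 'D', 'X', 'Z'],
--     'D': ['S', 'E', 'R', 'F', 'C', 'X'],
--     'F': ['D', 'R', 'T', 'G', 'V', 'C'],
--     'G': ['F', 'T', 'Y', 'H', 'B', 'V'],
--     'H': ['G', 'Y', 'U', 'J', 'N', 'B'],
--     'J': ['H', 'U', 'I', 'K', 'M', 'N'],
--     'K': ['J', 'I', 'O', 'L', 'M'],
--     'L': ['K', 'O', 'P'],
--     'Z': ['A', 'S', 'X'],
--     'X': ['Z', 'S', 'D', 'C'],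
--     'C': ['X', 'D', 'F', 'V'],
--     'V': ['C', 'F', 'G', 'B'],
--     'B': ['V', 'G', 'H', 'N'],
--     'N': ['B', 'H', 'J', 'M'],
--     'M': ['N', 'J', 'K'],
-- }
--
-- def bfs(start, end):
--     queue = deque([(start, 0)])
--     visited = set(start)
--
--     while queue:
--         current, dist = queue.popleft()
--
--         if current == end:
--             return dist
--
--         for nxt in keyboard[current]:
--             if nxt not in visited:
--                 visited.add(nxt)
--
--                 queue.append((nxt, dist+2))
--
--     return None
-- ===== SOURCE B (Python) =====
-- # The QWERTY adjacency in `keyboard` is exactly the triangular (hex) lattice on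
-- # row/column coordinates, so the BFS distance has a closed form: with axial
-- # coordinates (row, col), hops = (|dc| + |dr| + |dc+dr|) / 2 and each hop costs 2,
-- # i.e. the answer is |dc| + |dr| + |dc+dr|.  No search at all.
--
-- _rows = ['QWERTYUIOP', 'ASDFGHJKL', 'ZXCVBNM']
-- pos = {k: (r, c) for r, row in enumerate(_rows) for c, k in enumerate(row)}
--
-- def bfs(start, end):
--     if start == end:
--         return 0
--     r1, c1 = pos[start]          # invalid start raises KeyError, like keyboard[start]
--     if end not in pos:
--         return None
--     r2, c2 = pos[end]
--     dq = c2 - c1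
--     dr = r2 - r1
--     return abs(dq) + abs(dr) + abs(dq + dr)
-- ===== Notes on version B (the rewrite author's own statement) =====
-- stated objective: faster
-- what changed: Replaces the BFS over the adjacency dictionary with a closed-form hex-lattice distance on (row,col) key coordinates: the keyboard graph is a triangular lattice, so the answer is |dc|+|dr|+|dc+dr|, computed with no search or queue.
import Mathlib
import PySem

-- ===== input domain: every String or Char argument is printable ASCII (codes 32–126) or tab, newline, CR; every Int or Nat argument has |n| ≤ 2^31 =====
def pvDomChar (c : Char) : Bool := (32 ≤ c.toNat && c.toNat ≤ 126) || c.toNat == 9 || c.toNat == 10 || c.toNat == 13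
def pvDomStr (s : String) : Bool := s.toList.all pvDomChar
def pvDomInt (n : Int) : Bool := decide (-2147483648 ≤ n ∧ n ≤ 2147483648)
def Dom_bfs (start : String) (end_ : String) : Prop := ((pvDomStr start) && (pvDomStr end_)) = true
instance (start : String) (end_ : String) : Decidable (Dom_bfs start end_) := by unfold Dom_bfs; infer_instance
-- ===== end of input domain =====

-- B replaces A's BFS over the adjacency dictionary by a closed-form hex-lattice distance on
-- (row, col) key coordinates: no queue, no visited set, just arithmetic.

-- ===== PORT A =====
def keyboard : PySem.Dict String (List String) := PySem.Dict.ofList [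
  ("Q", ["W", "A"]),
  ("W", ["Q", "A", "S", "E"]),
  ("E", ["W", "S", "D", "R"]),
  ("R", ["E", "D", "F", "T"]),
  ("T", ["R", "F", "G", "Y"]),
  ("Y", ["T", "G", "H", "U"]),
  ("U", ["Y", "H", "J", "I"]),
  ("I", ["U", "J", "K", "O"]),
  ("O", ["I", "K", "L", "P"]),
  ("P", ["O", "L"]),
  ("A", ["Q", "W", "S", "Z"]),
  ("S", ["A", "W", "E", "D", "X", "Z"]),
  ("D", ["S", "E", "R", "F", "C", "X"]),
  ("F", ["D", "R", "T", "G", "V", "C"]),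
  ("G", ["F", "T", "Y", "H", "B", "V"]),
  ("H", ["G", "Y", "U", "J", "N", "B"]),
  ("J", ["H", "U", "I", "K", "M", "N"]),
  ("K", ["J", "I", "O", "L", "M"]),
  ("L", ["K", "O", "P"]),
  ("Z", ["A", "S", "X"]),
  ("X", ["Z", "S", "D", "C"]),
  ("C", ["X", "D", "F", "V"]),
  ("V", ["C", "F", "G", "B"]),
  ("B", ["V", "G", "H", "N"]),
  ("N", ["B", "H", "J", "M"]),
  ("M", ["N", "J", "K"])]

-- A's while-loop: pop (current, dist); return dist if current == end; else enqueue the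
-- unvisited neighbours with dist+2.  The fuel only makes the recursion total: the loop pops at
-- most 27 pairs (each key is enqueued at most once), so fuel 64 is never exhausted.
-- keyboard[current] on a missing key is a Python KeyError: the port returns none there, and
-- Pre_bfs excludes exactly those inputs.
def bfsLoopA (fuel : Nat) (queue : List (String × Int)) (visited : PySem.Set String)
    (end_ : String) : Option Int :=
  match fuel, queue with
  | 0, _ => none
  | _ + 1, [] => none
  | fuel + 1, (current, dist) :: rest =>
    if current == end_ then some dist
    else
      match keyboard.get? current with
      | none => none   -- Python: KeyError (outside Pre_bfs)
      | some nbrs =>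
        let st := nbrs.foldl
          (fun (qv : List (String × Int) × PySem.Set String) nxt =>
            if PySem.Set.contains qv.2 nxt then qv
            else (qv.1 ++ [(nxt, dist + 2)], PySem.Set.add qv.2 nxt))
          (rest, visited)
        bfsLoopA fuel st.1 st.2 end_

def bfs (start : String) (end_ : String) : Option Int :=
  -- visited = set(start): the set of start's characters (as 1-char strings)
  bfsLoopA 64 [(start, 0)]
    (PySem.Set.ofList (start.toList.map (fun c => String.ofList [c]))) end_

-- ===== PORT B =====
-- pos = {k: (r, c) for r, row in enumerate(_rows) for c, k in enumerate(row)}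
def rowsB : List String := ["QWERTYUIOP", "ASDFGHJKL", "ZXCVBNM"]

def posKB : PySem.Dict String (Int × Int) :=
  (PySem.List.enumerate rowsB).foldl
    (fun d rrow =>
      (PySem.List.enumerate rrow.2.toList).foldl
        (fun d ck => d.insert (String.ofList [ck.2]) (rrow.1, ck.1)) d)
    PySem.Dict.empty

def bfs_alt (start : String) (end_ : String) : Option Int :=
  if start == end_ then some 0
  else
    match posKB.get? start with
    | none => none   -- Python: KeyError on pos[start] (outside Pre_bfs)
    | some (r1, c1) =>
      match posKB.get? end_ with
      | none => none   -- `end not in pos`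
      | some (r2, c2) =>
        let dq := c2 - c1
        let dr := r2 - r1
        some (|dq| + |dr| + |dq + dr|)

-- ===== PRECONDITION & SPEC =====
-- Pre_bfs: exactly the inputs where Python A returns normally — either start == end (A returns 0
-- before any dictionary access) or start is a keyboard key; otherwise keyboard[start] raises KeyError.
def Pre_bfs (start : String) (end_ : String) : Prop :=
  start = end_ ∨ start ∈ keyboard.keys

instance (start : String) (end_ : String) : Decidable (Pre_bfs start end_) := by
  unfold Pre_bfs; infer_instance

def pvWitness_bfs : String × String := ("Q", "M")

def Spec_bfs (start : String) (end_ : String) (out : Option Int) : Prop := out = bfs_alt start end_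
instance (start : String) (end_ : String) (out : Option Int) : Decidable (Spec_bfs start end_ out) := by unfold Spec_bfs; infer_instance

-- ===== CLAIM (what is proved, stated in full; the proofs are below) =====
def Claim_equal_bfs : Prop := ∀ (start : String) (end_ : String), Dom_bfs start end_ → Pre_bfs start end_ → Spec_bfs start end_ (bfs start end_)

-- ===== LEMMAS AND PROOFS =====

-- the keyboard's key list (used only by the proofs below)
def keysL : List String := keyboard.keys

set_option maxRecDepth 100000 in
-- every neighbour list of the keyboard is contained in the key list
theorem nb_sub : (keysL.all fun k => ((keyboard.get? k).getD []).all (fun n => decide (n ∈ keysL))) = true := by decide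

theorem nb_sub' (k : String) (hk : k ∈ keysL) (nbrs : List String)
    (h : keyboard.get? k = some nbrs) : ∀ n ∈ nbrs, n ∈ keysL := by
  intro n hn
  have := (List.all_eq_true.mp nb_sub) k hk
  rw [h] at this
  simp only [Option.getD_some, List.all_eq_true] at this
  exact of_decide_eq_true (this n hn)

-- invariant of A's inner neighbour fold: all enqueued nodes are keys
theorem foldA_inv (d : Int) (nbrs : List String) (hn : ∀ n ∈ nbrs, n ∈ keysL) :
    ∀ (q : List (String × Int)) (v : PySem.Set String), (∀ p ∈ q, p.1 ∈ keysL) →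
    ∀ p ∈ (nbrs.foldl
      (fun (qv : List (String × Int) × PySem.Set String) nxt =>
        if PySem.Set.contains qv.2 nxt then qv
        else (qv.1 ++ [(nxt, d + 2)], PySem.Set.add qv.2 nxt)) (q, v)).1, p.1 ∈ keysL := by
  induction nbrs with
  | nil => intro q v hq; simpa using hq
  | cons n rest ih =>
    intro q v hq
    have hn' : ∀ m ∈ rest, m ∈ keysL := fun m hm => hn m (List.mem_cons_of_mem _ hm)
    simp only [List.foldl_cons]
    by_cases hc : PySem.Set.contains v n = true
    · simp only [hc, if_pos]
      exact ih hn' q v hq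
    · simp only [hc, if_neg, Bool.not_eq_true]
      refine ih hn' _ _ ?_
      intro p hp
      rcases List.mem_append.mp hp with h1 | h1
      · exact hq p h1
      · rcases List.mem_singleton.mp h1 with rfl
        exact hn n (List.mem_cons_self ..)

-- A's loop only tests `x == end_` for keys x: congruence in end_
theorem congA (e e' : String) (he : ∀ x ∈ keysL, (x == e) = (x == e')) :
    ∀ (fuel : Nat) (queue : List (String × Int)) (visited : PySem.Set String),
      (∀ p ∈ queue, p.1 ∈ keysL) →
      bfsLoopA fuel queue visited e = bfsLoopA fuel queue visited e' := by
  intro fuel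
  induction fuel with
  | zero => intro queue visited _; simp [bfsLoopA]
  | succ n ih =>
    intro queue visited hq
    match queue with
    | [] => simp [bfsLoopA]
    | (current, dist) :: rest =>
      have hcur : current ∈ keysL := hq _ (List.mem_cons_self ..)
      simp only [bfsLoopA]
      rw [he current hcur]
      by_cases hce : (current == e') = true
      · simp [hce]
      · simp only [hce, Bool.false_eq_true]
        cases hgd : keyboard.get? current with
        | none => rfl
        | some nbrs =>
          have hrest : ∀ p ∈ rest, p.1 ∈ keysL := fun p hp => hq p (List.mem_cons_of_mem _ hp)
          exact ih _ _ (foldA_inv dist nbrs (nb_sub' current hcur nbrs hgd) rest visited hrest)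

set_option maxRecDepth 100000 in
-- B's coordinate table has exactly the keyboard's keys
theorem posKB_keys : posKB.keys = keysL := by decide

-- a non-key has no coordinates
theorem posKB_none (e : String) (he : e ∉ keysL) : posKB.get? e = none := by
  rw [PySem.Dict.get?_eq_none_iff_not_mem_keys, posKB_keys]
  exact he

set_option maxRecDepth 100000 in
-- both programs agree for every pair of keys
theorem agree_keys : (keysL.all fun s => keysL.all fun e => bfs s e == bfs_alt s e) = true := by
  decide

set_option maxRecDepth 100000 in
-- A returns none from any key start when the target is the non-key "1"
theorem a_nonkey : (keysL.all fun s => bfs s "1" == none) = true := by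
  decide

theorem self_case (s : String) : bfs s s = bfs_alt s s := by
  have hA : bfs s s = some 0 := by
    show bfsLoopA (63 + 1) [(s, 0)] _ s = some 0
    simp [bfsLoopA]
  have hB : bfs_alt s s = some 0 := by simp [bfs_alt]
  rw [hA, hB]

theorem one_not_key : "1" ∉ keysL := by decide

-- ===== VERDICT (by name: the statement is the Claim_ definition above) =====
theorem bfs_spec : Claim_equal_bfs := by
  intro start end_ _hdom hpre
  unfold Spec_bfs
  by_cases heq : start = end_
  · subst heq; exact self_case start
  · have hstart : start ∈ keysL := by
      rcases hpre with h | h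
      · exact absurd h heq
      · exact h
    by_cases hek : end_ ∈ keysL
    · have h1 := (List.all_eq_true.mp agree_keys) start hstart
      have h2 := (List.all_eq_true.mp h1) end_ hek
      exact eq_of_beq h2
    · -- end_ is not a key: A exhausts the queue (as at the non-key "1"); B sees no coordinates
      have he : ∀ x ∈ keysL, (x == end_) = (x == "1") := by
        intro x hx
        have hx1 : x ≠ end_ := fun h => hek (h ▸ hx)
        have hx2 : x ≠ "1" := fun h => one_not_key (h ▸ hx)
        rw [beq_eq_false_iff_ne.mpr hx1, beq_eq_false_iff_ne.mpr hx2]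
      have hA : bfs start end_ = bfs start "1" := by
        unfold bfs
        exact congA end_ "1" he 64 [(start, 0)] _
          (by intro p hp; rcases List.mem_singleton.mp hp with rfl; exact hstart)
      have hB : bfs_alt start end_ = none := by
        unfold bfs_alt
        rw [beq_eq_false_iff_ne.mpr heq]
        simp only [Bool.false_eq_true, if_false]
        rw [posKB_none end_ hek]
        cases posKB.get? start with
        | none => rfl
        | some p => obtain ⟨r1, c1⟩ := p; rfl
      rw [hA, hB]
      exact eq_of_beq ((List.all_eq_true.mp a_nonkey) start hstart)
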